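-- pv_equiv track=rewrite | github.com/changshengEVA/M-Agent | src/m_agent/memory/memory_core/core/neo4j_store.py | _to_direct_url
-- ===== SOURCE A (Python) =====
-- from typing import Any, Dict, Optional
--
-- def _to_direct_url(url: str) -> Optional[str]:
--     text = str(url or "").strip()
--     mappings = [
--         ("neo4j+ssc://", "bolt+ssc://"),
--         ("neo4j+s://", "bolt+s://"),
--         ("neo4j://", "bolt://"),
--     ]
--     for src, dst in mappings:
--         if text.startswith(src):
--             return dst + text[len(src) :]
--     return None
-- ===== SOURCE B (Python) =====
-- def _to_direct_url(url):
--     text = str(url or "").strip()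
--     i = text.find("://")
--     if i < 0:
--         return None
--     mapped = {"neo4j+ssc": "bolt+ssc", "neo4j+s": "bolt+s", "neo4j": "bolt"}.get(text[:i])
--     if mapped is None:
--         return None
--     return mapped + text[i:]
-- ===== Notes on version B (the rewrite author's own statement) =====
-- stated objective: alternative
-- what changed: Instead of scanning a list of (prefix, replacement) pairs with repeated startswith tests, B locates the scheme separator once with find, takes the scheme before it, and maps it through a dict lookup, rebuilding the URL from the mapped scheme and the remainder.
import Mathlib
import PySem

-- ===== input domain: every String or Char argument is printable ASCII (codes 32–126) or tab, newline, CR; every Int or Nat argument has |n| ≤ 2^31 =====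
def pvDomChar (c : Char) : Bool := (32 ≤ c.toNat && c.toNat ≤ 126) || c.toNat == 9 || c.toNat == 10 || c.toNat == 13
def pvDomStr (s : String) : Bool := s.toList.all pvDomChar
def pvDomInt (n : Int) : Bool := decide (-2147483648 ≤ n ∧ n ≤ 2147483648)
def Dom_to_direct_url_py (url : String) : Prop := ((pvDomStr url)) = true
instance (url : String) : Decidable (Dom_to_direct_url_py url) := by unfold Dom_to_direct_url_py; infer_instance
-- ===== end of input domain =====

-- B replaces A's scan over (prefix, replacement) pairs by a single find of the scheme separator plus a dict lookup of the scheme (alternative decomposition, same cost).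

-- ===== PORT A =====
-- the 'for src, dst in mappings' loop: first match wins
def to_direct_url_goA : List (List Char × List Char) → List Char → Option (List Char)
  | [], _ => none
  | (src, dst) :: rest, text =>
    if PySem.Chars.startswith text src then
      some (dst ++ PySem.List.slice text (some (src.length : Int)) none)
    else to_direct_url_goA rest text

def to_direct_url_py (url : String) : Option String :=
  let text := PySem.Chars.strip url.toList
  let mappings : List (List Char × List Char) :=
    [("neo4j+ssc://".toList, "bolt+ssc://".toList),
     ("neo4j+s://".toList, "bolt+s://".toList),
     ("neo4j://".toList, "bolt://".toList)]
  (to_direct_url_goA mappings text).map String.ofList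

-- ===== PORT B =====
def to_direct_url_py_alt (url : String) : Option String :=
  let text := PySem.Chars.strip url.toList
  let i := PySem.Chars.find text "://".toList
  if i < 0 then none
  else
    let d : PySem.Dict (List Char) (List Char) :=
      PySem.Dict.ofList [("neo4j+ssc".toList, "bolt+ssc".toList),
                         ("neo4j+s".toList, "bolt+s".toList),
                         ("neo4j".toList, "bolt".toList)]
    match d.get? (PySem.List.slice text none (some i)) with
    | none => none
    | some m => some (String.ofList (m ++ PySem.List.slice text (some i) none))

-- ===== PRECONDITION & SPEC =====
def Spec_to_direct_url_py (url : String) (out : Option String) : Prop := out = to_direct_url_py_alt url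
instance (url : String) (out : Option String) : Decidable (Spec_to_direct_url_py url out) := by unfold Spec_to_direct_url_py; infer_instance

-- ===== CLAIM (what is proved, stated in full; the proofs are below) =====
def Claim_equal_to_direct_url_py : Prop := ∀ (url : String), Dom_to_direct_url_py url → Spec_to_direct_url_py url (to_direct_url_py url)

-- ===== LEMMAS AND PROOFS =====

-- if t starts with K followed by the separator and K has no colon, the separator first occurs at K.length
theorem find_of_prefix (t K : List Char) (hK : ':' ∉ K)
    (h : (K ++ "://".toList) <+: t) :
    PySem.Chars.find t "://".toList = (K.length : Int) := by
  obtain ⟨r, hr⟩ := h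
  have hinf : "://".toList <:+: t := ⟨K, r, by rw [← hr, List.append_assoc]⟩
  have hne : PySem.Chars.find t "://".toList ≠ -1 :=
    (PySem.Chars.find_ne_neg_one_iff t "://".toList).mpr hinf
  have hge : -1 ≤ PySem.Chars.find t "://".toList := PySem.Chars.neg_one_le_find t "://".toList
  have h0 : 0 ≤ PySem.Chars.find t "://".toList := by omega
  obtain ⟨hpre, hmin⟩ := PySem.Chars.find_spec h0
  set j := (PySem.Chars.find t "://".toList).toNat with hjdef
  have hKp : "://".toList <+: t.drop K.length := ⟨r, by rw [← hr, List.append_assoc, List.drop_left]⟩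
  have hle : j ≤ K.length := by
    by_contra hgt
    exact hmin K.length (by omega) hKp
  have heq : j = K.length := by
    by_contra hne2
    have hlt : j < K.length := by omega
    obtain ⟨u, hu⟩ := hpre
    have h1 : t[j]? = some ':' := by
      have e0 : (t.drop j)[0]? = t[j + 0]? := List.getElem?_drop
      rw [← hu] at e0
      rw [List.getElem?_append_left (by decide)] at e0
      simpa using e0.symm
    have h2 : t[j]? = some K[j] := by
      rw [← hr, List.getElem?_append_left (by simp; omega),
          List.getElem?_append_left hlt, List.getElem?_eq_getElem hlt]
    have : K[j] = ':' := by
      rw [h1] at h2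
      exact (Option.some_injective _ h2).symm
    exact hK (this ▸ List.getElem_mem hlt)
  rw [show PySem.Chars.find t "://".toList = (j : Int) from (Int.toNat_of_nonneg h0).symm, heq]

-- get? of the 3-key scheme dict is none off its keys
theorem dict_get?_none (S : List Char) (h1 : S ≠ "neo4j+ssc".toList)
    (h2 : S ≠ "neo4j+s".toList) (h3 : S ≠ "neo4j".toList) :
    (PySem.Dict.ofList [("neo4j+ssc".toList, "bolt+ssc".toList),
     ("neo4j+s".toList, "bolt+s".toList), ("neo4j".toList, "bolt".toList)]).get? S = none := by
  rw [show ("neo4j+ssc".toList : List Char) = ['n','e','o','4','j','+','s','s','c'] from by decide] at h1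
  rw [show ("neo4j+s".toList : List Char) = ['n','e','o','4','j','+','s'] from by decide] at h2
  rw [show ("neo4j".toList : List Char) = ['n','e','o','4','j'] from by decide] at h3
  simp [PySem.Dict.get?]
  intro a b h
  fin_cases h
  exacts [fun h => h1 h.symm, fun h => h2 h.symm, fun h => h3 h.symm]

theorem to_direct_url_main (t : List Char) :
    (to_direct_url_goA
      [("neo4j+ssc://".toList, "bolt+ssc://".toList),
       ("neo4j+s://".toList, "bolt+s://".toList),
       ("neo4j://".toList, "bolt://".toList)] t).map String.ofList =
    (if PySem.Chars.find t "://".toList < 0 then none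
     else
      match (PySem.Dict.ofList [("neo4j+ssc".toList, "bolt+ssc".toList),
                         ("neo4j+s".toList, "bolt+s".toList),
                         ("neo4j".toList, "bolt".toList)]).get?
              (PySem.List.slice t none (some (PySem.Chars.find t "://".toList))) with
      | none => none
      | some m => some (String.ofList (m ++ PySem.List.slice t (some (PySem.Chars.find t "://".toList)) none))) := by
  have hsw_true : ∀ K : List Char, (K ++ "://".toList) <+: t →
      PySem.Chars.startswith t (K ++ "://".toList) = true := fun K h =>
    (PySem.Chars.startswith_iff t (K ++ "://".toList)).mpr h
  rcases lt_or_ge (PySem.Chars.find t "://".toList) 0 with hneg | hpos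
  · -- separator absent: no prefix matches either
    rw [if_pos hneg]
    have nosw : ∀ K : List Char, ':' ∉ K →
        PySem.Chars.startswith t (K ++ "://".toList) = false := by
      intro K hK
      cases hsw : PySem.Chars.startswith t (K ++ "://".toList) with
      | false => rfl
      | true =>
        exfalso
        have := find_of_prefix t K hK ((PySem.Chars.startswith_iff t (K ++ "://".toList)).mp hsw)
        omega
    have e1 := nosw "neo4j+ssc".toList (by decide)
    have e2 := nosw "neo4j+s".toList (by decide)
    have e3 := nosw "neo4j".toList (by decide)
    rw [show ("neo4j+ssc://".toList : List Char) = "neo4j+ssc".toList ++ "://".toList from by decide] at *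
    rw [show ("neo4j+s://".toList : List Char) = "neo4j+s".toList ++ "://".toList from by decide] at *
    rw [show ("neo4j://".toList : List Char) = "neo4j".toList ++ "://".toList from by decide] at *
    simp only [to_direct_url_goA, e1, e2, e3, Bool.false_eq_true, if_false, Option.map_none]
  · -- separator first occurs at j; decompose t there
    rw [if_neg (not_lt.mpr hpos)]
    set j := (PySem.Chars.find t "://".toList).toNat with hjdef
    have hj : PySem.Chars.find t "://".toList = (j : Int) := (Int.toNat_of_nonneg hpos).symm
    obtain ⟨hpre, hmin⟩ := PySem.Chars.find_spec hpos
    obtain ⟨u, hu⟩ := hpre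
    rw [← hjdef] at hu
    have hulen : 3 + u.length = t.length - j := by
      have h' := congrArg List.length hu
      rw [List.length_append, List.length_drop,
          show ("://".toList).length = 3 from rfl] at h'
      exact h'
    have htake : (t.take j).length = j := by
      rw [List.length_take]
      omega
    have hdecomp : t = t.take j ++ ("://".toList ++ u) := by
      conv_lhs => rw [← List.take_append_drop j t, ← hu]
    have hdropj : t.drop j = "://".toList ++ u := hu.symm
    have hdrop3 : t.drop (j + 3) = u := by
      rw [← List.drop_drop, hdropj,
          show (3 : Nat) = ("://".toList).length from rfl, List.drop_left]
    have hsliceTo : PySem.List.slice t none (some (PySem.Chars.find t "://".toList)) = t.take j := by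
      rw [hj, PySem.List.slice_to _ (by omega)]
      simp
    have hsliceFrom : PySem.List.slice t (some (PySem.Chars.find t "://".toList)) none = t.drop j := by
      rw [hj, PySem.List.slice_from _ (by omega)]
      simp
    have hsw : ∀ K : List Char, t.take j = K → PySem.Chars.startswith t (K ++ "://".toList) = true := by
      intro K hSK
      exact hsw_true K ⟨u, by rw [← hSK, List.append_assoc, ← hdecomp]⟩
    have nosw : ∀ K : List Char, ':' ∉ K → t.take j ≠ K →
        PySem.Chars.startswith t (K ++ "://".toList) = false := by
      intro K hK hne
      cases hsw' : PySem.Chars.startswith t (K ++ "://".toList) with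
      | false => rfl
      | true =>
        exfalso
        have hf := find_of_prefix t K hK ((PySem.Chars.startswith_iff t (K ++ "://".toList)).mp hsw')
        have hjK : j = K.length := by omega
        obtain ⟨r, hr⟩ := (PySem.Chars.startswith_iff t (K ++ "://".toList)).mp hsw'
        apply hne
        rw [hjK, ← hr, List.append_assoc, List.take_left]
    rw [show ("neo4j+ssc://".toList : List Char) = "neo4j+ssc".toList ++ "://".toList from by decide,
        show ("neo4j+s://".toList : List Char) = "neo4j+s".toList ++ "://".toList from by decide,
        show ("neo4j://".toList : List Char) = "neo4j".toList ++ "://".toList from by decide]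
    by_cases hS1 : t.take j = "neo4j+ssc".toList
    · have hj9 : j = 9 := by rw [hS1] at htake; simpa using htake.symm
      have hget : (PySem.Dict.ofList [("neo4j+ssc".toList, "bolt+ssc".toList),
                         ("neo4j+s".toList, "bolt+s".toList),
                         ("neo4j".toList, "bolt".toList)]).get? ("neo4j+ssc".toList) =
          some ("bolt+ssc".toList) := by decide
      rw [hsliceTo, hsliceFrom, hS1, hget]
      simp only [to_direct_url_goA, hsw _ hS1, if_true]
      have hlen : (("neo4j+ssc".toList ++ "://".toList : List Char).length : Int) = ((12 : Nat) : Int) := by decide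
      rw [hlen, PySem.List.slice_from _ (by omega)]
      simp only [Option.map_some]
      congr 1
      rw [Int.toNat_natCast, show (12 : Nat) = j + 3 from by omega, hdrop3, hdropj,
          show ("bolt+ssc://".toList : List Char) = "bolt+ssc".toList ++ "://".toList from by decide,
          List.append_assoc]
    · by_cases hS2 : t.take j = "neo4j+s".toList
      · have hj7 : j = 7 := by rw [hS2] at htake; simpa using htake.symm
        have hget : (PySem.Dict.ofList [("neo4j+ssc".toList, "bolt+ssc".toList),
                           ("neo4j+s".toList, "bolt+s".toList),
                           ("neo4j".toList, "bolt".toList)]).get? ("neo4j+s".toList) =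
            some ("bolt+s".toList) := by decide
        rw [hsliceTo, hsliceFrom, hS2, hget]
        simp only [to_direct_url_goA, nosw _ (by decide) hS1, hsw _ hS2, if_true, Bool.false_eq_true,
          if_false]
        have hlen : (("neo4j+s".toList ++ "://".toList : List Char).length : Int) = ((10 : Nat) : Int) := by decide
        rw [hlen, PySem.List.slice_from _ (by omega)]
        simp only [Option.map_some]
        congr 1
        rw [Int.toNat_natCast, show (10 : Nat) = j + 3 from by omega, hdrop3, hdropj,
            show ("bolt+s://".toList : List Char) = "bolt+s".toList ++ "://".toList from by decide,
            List.append_assoc]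
      · by_cases hS3 : t.take j = "neo4j".toList
        · have hj5 : j = 5 := by rw [hS3] at htake; simpa using htake.symm
          have hget : (PySem.Dict.ofList [("neo4j+ssc".toList, "bolt+ssc".toList),
                             ("neo4j+s".toList, "bolt+s".toList),
                             ("neo4j".toList, "bolt".toList)]).get? ("neo4j".toList) =
              some ("bolt".toList) := by decide
          rw [hsliceTo, hsliceFrom, hS3, hget]
          simp only [to_direct_url_goA, nosw _ (by decide) hS1, nosw _ (by decide) hS2,
            hsw _ hS3, if_true, Bool.false_eq_true, if_false]
          have hlen : (("neo4j".toList ++ "://".toList : List Char).length : Int) = ((8 : Nat) : Int) := by decide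
          rw [hlen, PySem.List.slice_from _ (by omega)]
          simp only [Option.map_some]
          congr 1
          rw [Int.toNat_natCast, show (8 : Nat) = j + 3 from by omega, hdrop3, hdropj,
              show ("bolt://".toList : List Char) = "bolt".toList ++ "://".toList from by decide,
              List.append_assoc]
        · rw [hsliceTo, dict_get?_none _ hS1 hS2 hS3]
          simp only [to_direct_url_goA, nosw _ (by decide) hS1, nosw _ (by decide) hS2,
            nosw _ (by decide) hS3, Bool.false_eq_true, if_false, Option.map_none]

-- ===== VERDICT (by name: the statement is the Claim_ definition above) =====
theorem to_direct_url_py_spec : Claim_equal_to_direct_url_py := by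
  intro url _
  unfold Spec_to_direct_url_py to_direct_url_py to_direct_url_py_alt
  exact to_direct_url_main (PySem.Chars.strip url.toList)
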